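-- pv_equiv track=rewrite | github.com/levivandepol/Gijswijt-sequences | iota_m.py | first_nonzero_bits
-- ===== SOURCE A (Python) =====
-- def first_nonzero_bits(expansion): # returns the location of the first two nonzero bits of expansion
--     length = len(expansion)        # if they exist
--     t = 0
--     while (expansion[t]==0):
--         t += 1
--     u = t+1
--     while (u<length and expansion[u] == 0):
--         u += 1
--     if u < length:
--         return (t+1,u+1)
--     else:
--         return [t+1]
-- ===== SOURCE B (Python) =====
-- def first_nonzero_bits(expansion):
--     idx = [i for i, x in enumerate(expansion) if x != 0]
--     if len(idx) >= 2:
--         return (idx[0] + 1, idx[1] + 1)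
--     return [idx[0] + 1]
-- ===== Notes on version B (the rewrite author's own statement) =====
-- stated objective: simpler
-- what changed: Replaces A's two targeted while-loop scans with index bookkeeping by one comprehension that materialises all nonzero positions and a single branch on its length.
import Mathlib
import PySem

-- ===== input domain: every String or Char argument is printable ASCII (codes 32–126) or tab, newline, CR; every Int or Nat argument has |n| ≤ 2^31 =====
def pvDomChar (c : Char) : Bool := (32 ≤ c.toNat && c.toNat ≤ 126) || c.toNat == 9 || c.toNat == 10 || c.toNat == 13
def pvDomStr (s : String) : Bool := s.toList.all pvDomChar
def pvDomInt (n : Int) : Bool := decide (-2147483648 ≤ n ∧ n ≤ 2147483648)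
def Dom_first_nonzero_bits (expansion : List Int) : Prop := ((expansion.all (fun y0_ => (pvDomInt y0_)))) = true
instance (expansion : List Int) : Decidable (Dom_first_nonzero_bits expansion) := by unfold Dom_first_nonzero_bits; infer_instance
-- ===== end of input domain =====

-- B replaces A's two targeted while-loop scans with one pass that materialises all
-- nonzero positions, then branches on how many there are (objective: simpler).

-- ===== PORT A =====
-- first while loop: advance t while expansion[t] == 0 (IndexError = none when it runs off the end)
def pvAgoT : List Int → Nat → Option Nat
  | [], _ => none
  | x :: xs, t => if x = 0 then pvAgoT xs (t + 1) else some t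

-- second while loop: advance u while u < length and expansion[u] == 0 (scans the suffix after t)
def pvAgoU : List Int → Nat → Nat
  | [], u => u
  | x :: xs, u => if x = 0 then pvAgoU xs (u + 1) else u

def first_nonzero_bits (expansion : List Int) : List Int :=
  let length := expansion.length
  match pvAgoT expansion 0 with
  | none => []   -- IndexError in Python; excluded by Pre_
  | some t =>
    let u := pvAgoU (expansion.drop (t + 1)) (t + 1)
    if u < length then [(t : Int) + 1, (u : Int) + 1] else [(t : Int) + 1]

-- ===== PORT B =====
def first_nonzero_bits_alt (expansion : List Int) : List Int :=
  let idx := ((PySem.List.enumerate expansion).filter (fun p => p.2 ≠ 0)).map Prod.fst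
  match idx with
  | i :: j :: _ => [i + 1, j + 1]
  | [i] => [i + 1]
  | [] => []     -- idx[0] raises IndexError in Python; excluded by Pre_

-- ===== PRECONDITION & SPEC =====
-- Pre_ excludes exactly the inputs (empty or all-zero list) on which both Pythons raise IndexError.
def Pre_first_nonzero_bits (expansion : List Int) : Prop := ∃ x ∈ expansion, x ≠ 0
instance (expansion : List Int) : Decidable (Pre_first_nonzero_bits expansion) := by
  unfold Pre_first_nonzero_bits; infer_instance
def pvWitness_first_nonzero_bits : List Int := [0, 3, 0, 5]

def Spec_first_nonzero_bits (expansion : List Int) (out : List Int) : Prop := out = first_nonzero_bits_alt expansion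
instance (expansion : List Int) (out : List Int) : Decidable (Spec_first_nonzero_bits expansion out) := by unfold Spec_first_nonzero_bits; infer_instance

-- ===== CLAIM (what is proved, stated in full; the proofs are below) =====
def Claim_equal_first_nonzero_bits : Prop := ∀ (expansion : List Int), Dom_first_nonzero_bits expansion → Pre_first_nonzero_bits expansion → Spec_first_nonzero_bits expansion (first_nonzero_bits expansion)

-- ===== LEMMAS AND PROOFS =====

-- the list of (Nat) positions of nonzero entries, starting at index i
def pvIdxL : List Int → Nat → List Nat
  | [], _ => []
  | x :: xs, i => if x = 0 then pvIdxL xs (i + 1) else i :: pvIdxL xs (i + 1)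

theorem pvIdxL_bounds : ∀ (xs : List Int) (i j : Nat), j ∈ pvIdxL xs i → i ≤ j ∧ j < i + xs.length := by
  intro xs
  induction xs with
  | nil => intro i j h; simp [pvIdxL] at h
  | cons x xs ih =>
    intro i j h
    simp only [pvIdxL] at h
    split_ifs at h with hx
    · have := ih (i + 1) j h; simp only [List.length_cons]; omega
    · rcases List.mem_cons.1 h with h | h
      · subst h; simp
      · have := ih (i + 1) j h; simp only [List.length_cons]; omega

theorem pvAgoT_eq : ∀ (xs : List Int) (t : Nat), pvAgoT xs t = (pvIdxL xs t).head? := by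
  intro xs
  induction xs with
  | nil => intro t; simp [pvAgoT, pvIdxL]
  | cons x xs ih =>
    intro t
    simp only [pvAgoT, pvIdxL]
    split_ifs with hx
    · exact ih (t + 1)
    · simp

theorem pvAgoU_eq : ∀ (ys : List Int) (u : Nat), pvAgoU ys u = (pvIdxL ys u).headD (u + ys.length) := by
  intro ys
  induction ys with
  | nil => intro u; simp [pvAgoU, pvIdxL]
  | cons y ys ih =>
    intro u
    simp only [pvAgoU, pvIdxL]
    split_ifs with hy
    · rw [ih (u + 1)]; simp only [List.length_cons]; congr 1; omega
    · simp

theorem pvIdxL_drop : ∀ (xs : List Int) (i t : Nat) (rest : List Nat), i ≤ t →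
    pvIdxL xs i = t :: rest → pvIdxL (xs.drop (t + 1 - i)) (t + 1) = rest := by
  intro xs
  induction xs with
  | nil => intro i t rest _ h; simp [pvIdxL] at h
  | cons x xs ih =>
    intro i t rest hle h
    simp only [pvIdxL] at h
    split_ifs at h with hx
    · have hb : i + 1 ≤ t := by
        have := pvIdxL_bounds xs (i + 1) t (by rw [h]; simp)
        omega
      have : t + 1 - i = (t + 1 - (i + 1)) + 1 := by omega
      rw [this, List.drop_succ_cons]
      exact ih (i + 1) t rest hb h
    · rcases h with ⟨rfl, rfl⟩
      simp

-- B's comprehension computes the same position list (cast to Int)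
theorem pvIdx_eq : ∀ (xs : List Int) (s : Nat),
    ((PySem.List.enumerate xs (s : Int)).filter (fun p => p.2 ≠ 0)).map Prod.fst
      = (pvIdxL xs s).map (fun n => (n : Int)) := by
  intro xs
  induction xs with
  | nil => intro s; simp [PySem.List.enumerate_nil, pvIdxL]
  | cons x xs ih =>
    intro s
    rw [PySem.List.enumerate_cons]
    simp only [pvIdxL]
    split_ifs with hx
    · subst hx
      rw [List.filter_cons_of_neg (by simp)]
      rw [show ((s : Int) + 1) = ((s + 1 : Nat) : Int) by push_cast; ring]
      exact ih (s + 1)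
    · rw [List.filter_cons_of_pos (by simp [hx])]
      rw [List.map_cons, show ((s : Int) + 1) = ((s + 1 : Nat) : Int) by push_cast; ring,
        ih (s + 1)]
      simp

theorem pvIdx_eq0 (xs : List Int) :
    ((PySem.List.enumerate xs).filter (fun p => p.2 ≠ 0)).map Prod.fst
      = (pvIdxL xs 0).map (fun n => (n : Int)) := by
  simpa using pvIdx_eq xs 0

theorem pre_idxL_ne : ∀ (xs : List Int), (∃ x ∈ xs, x ≠ 0) → pvIdxL xs 0 ≠ [] := by
  have gen : ∀ (xs : List Int) (i : Nat), (∃ x ∈ xs, x ≠ 0) → pvIdxL xs i ≠ [] := by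
    intro xs
    induction xs with
    | nil => intro i h; simp at h
    | cons x xs ih =>
      intro i h
      simp only [pvIdxL]
      split_ifs with hx
      · apply ih
        rcases h with ⟨y, hy, hy0⟩
        rcases List.mem_cons.1 hy with rfl | hy
        · exact absurd hx hy0
        · exact ⟨y, hy, hy0⟩
      · simp
  intro xs; exact gen xs 0

-- ===== VERDICT (by name: the statement is the Claim_ definition above) =====
theorem first_nonzero_bits_spec : Claim_equal_first_nonzero_bits := by
  intro xs _ hpre
  unfold Spec_first_nonzero_bits first_nonzero_bits first_nonzero_bits_alt
  have hb := pvIdx_eq0 xs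
  rcases hl : pvIdxL xs 0 with _ | ⟨t, rest⟩
  · exact absurd hl (pre_idxL_ne xs hpre)
  · have htb := pvIdxL_bounds xs 0 t (by rw [hl]; simp)
    have hdrop : pvIdxL (xs.drop (t + 1)) (t + 1) = rest := by
      have := pvIdxL_drop xs 0 t rest (Nat.zero_le t) hl
      simpa using this
    have hA : pvAgoT xs 0 = some t := by rw [pvAgoT_eq, hl]; rfl
    have hdl : (xs.drop (t + 1)).length = xs.length - (t + 1) := by simp
    rw [hb, hl, hA]
    rcases hr : rest with _ | ⟨j, rest'⟩
    · -- only one nonzero: u hits length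
      have hu : pvAgoU (xs.drop (t + 1)) (t + 1) = xs.length := by
        rw [pvAgoU_eq, hdrop, hr, hdl]
        simp only [List.headD_nil]
        omega
      simp [hu]
    · -- second nonzero at j
      have hjb := pvIdxL_bounds (xs.drop (t + 1)) (t + 1) j (by rw [hdrop, hr]; simp)
      rw [hdl] at hjb
      have hu : pvAgoU (xs.drop (t + 1)) (t + 1) = j := by
        rw [pvAgoU_eq, hdrop, hr]; rfl
      simp only [hu]
      rw [if_pos (by omega)]
      simp
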